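-- pv_equiv track=rewrite | github.com/AttraQter-Labs/spectrum | invariants/core.py | invariant_difference
-- ===== SOURCE A (Python) =====
-- from typing import Any, Iterable, Iterator, Mapping, Sequence, Set
--
-- def invariant_difference(
--     a: Mapping[Any, Any], b: Mapping[Any, Any]
-- ) -> dict[Any, Any]:
--     """
--     Determine elements unique to the first invariant mapping.
--
--     Example:
--         >>> invariant_difference({'x': 1, 'y': 2}, {'y': 2})
--         {'x': 1}
--     """
--     diff = {}
--     for key, val in a.items():
--         if key not in b or b[key] != val:
--             diff[key] = val
--     return diff
-- ===== SOURCE B (Python) =====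
-- def invariant_difference(a, b):
--     """Copy-then-prune: start from a copy of `a` and delete every entry that `b` matches."""
--     diff = dict(a)
--     for key, val in b.items():
--         if key in diff and diff[key] == val:
--             del diff[key]
--     return diff
-- ===== Notes on version B (the rewrite author's own statement) =====
-- stated objective: alternative
-- what changed: Instead of one pass over a that inserts each non-matching entry into a fresh dict, B copies a wholesale and then loops over b deleting every entry the copy matches; same insertion order results because deletion preserves order.
import Mathlib
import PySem

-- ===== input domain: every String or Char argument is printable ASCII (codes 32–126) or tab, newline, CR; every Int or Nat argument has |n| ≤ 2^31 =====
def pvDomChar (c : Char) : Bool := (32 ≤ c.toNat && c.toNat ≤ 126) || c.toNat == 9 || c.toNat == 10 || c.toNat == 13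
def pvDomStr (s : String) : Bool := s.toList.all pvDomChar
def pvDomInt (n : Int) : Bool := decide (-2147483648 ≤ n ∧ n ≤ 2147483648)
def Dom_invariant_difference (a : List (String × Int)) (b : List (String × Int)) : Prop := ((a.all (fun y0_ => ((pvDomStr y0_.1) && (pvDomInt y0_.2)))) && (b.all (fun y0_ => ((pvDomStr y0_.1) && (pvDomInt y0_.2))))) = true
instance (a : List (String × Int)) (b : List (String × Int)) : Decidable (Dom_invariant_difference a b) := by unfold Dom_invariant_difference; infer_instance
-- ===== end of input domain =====

-- B replaces A's single filtering pass building a fresh dict by copy-then-prune (copy a, delete entries b matches); equivalence of the returned dict, same insertion order.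

-- ===== PORT A =====
-- 'key not in b or b[key] != val' on the dict b, as one helper
def pvNoMatch (b : List (String × Int)) (kv : String × Int) : Bool :=
  match (PySem.Dict.mk b).get? kv.1 with
  | none => true            -- key not in b
  | some w => w != kv.2     -- b[key] != val

def invariant_difference (a : List (String × Int)) (b : List (String × Int)) : List (String × Int) :=
  -- diff = {}; for key, val in a.items(): if key not in b or b[key] != val: diff[key] = val; return diff
  (a.foldl (fun diff kv => if pvNoMatch b kv then diff.insert kv.1 kv.2 else diff)
    (PySem.Dict.empty : PySem.Dict String Int)).items

-- ===== PORT B =====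
def invariant_difference_alt (a : List (String × Int)) (b : List (String × Int)) : List (String × Int) :=
  -- diff = dict(a); for key, val in b.items(): if key in diff and diff[key] == val: del diff[key]; return diff
  (b.foldl (fun diff kv => if diff.get? kv.1 = some kv.2 then diff.erase kv.1 else diff)
    (PySem.Dict.ofList a)).items

-- ===== PRECONDITION & SPEC =====
-- Pre_ requires the association lists to have distinct keys: they represent Python dicts,
-- which cannot carry duplicate keys, so no Python input is excluded.
def Pre_invariant_difference (a : List (String × Int)) (b : List (String × Int)) : Prop :=
  (a.map Prod.fst).Nodup ∧ (b.map Prod.fst).Nodup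
instance (a : List (String × Int)) (b : List (String × Int)) : Decidable (Pre_invariant_difference a b) := by unfold Pre_invariant_difference; infer_instance
def pvWitness_invariant_difference : (List (String × Int)) × (List (String × Int)) :=
  ([("x", 1), ("y", 2)], [("y", 2)])

def Spec_invariant_difference (a : List (String × Int)) (b : List (String × Int)) (out : List (String × Int)) : Prop := out = invariant_difference_alt a b
instance (a : List (String × Int)) (b : List (String × Int)) (out : List (String × Int)) : Decidable (Spec_invariant_difference a b out) := by unfold Spec_invariant_difference; infer_instance

-- ===== CLAIM (what is proved, stated in full; the proofs are below) =====
def Claim_equal_invariant_difference : Prop := ∀ (a : List (String × Int)) (b : List (String × Int)), Dom_invariant_difference a b → Pre_invariant_difference a b → Spec_invariant_difference a b (invariant_difference a b)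

-- ===== LEMMAS AND PROOFS =====

theorem pvNoMatch_eq (b : List (String × Int)) (kv : String × Int) :
    pvNoMatch b kv = !((PySem.Dict.mk b).get? kv.1 == some kv.2) := by
  cases h : (PySem.Dict.mk b).get? kv.1 <;> simp [pvNoMatch, h, bne]

-- A's conditional-insert loop over a with distinct keys builds exactly the filtered list.
theorem a_side (a b : List (String × Int)) (ha : (a.map Prod.fst).Nodup) :
    invariant_difference a b = a.filter (pvNoMatch b) := by
  unfold invariant_difference
  rw [← List.foldl_filter,
    PySem.Dict.items_foldl_insert_fresh (a.filter (pvNoMatch b)) Prod.fst Prod.snd _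
      (fun p _ => PySem.Dict.contains_empty p.1)
      (((List.filter_sublist (l := a) (p := pvNoMatch b)).map Prod.fst).nodup ha)]
  simp [PySem.Dict.empty]

-- B's delete loop over b prunes exactly the entries b matches, keeping order.
theorem b_side (b : List (String × Int)) (d : PySem.Dict String Int)
    (hb : (b.map Prod.fst).Nodup) (hd : d.keys.Nodup) :
    (b.foldl (fun diff kv => if diff.get? kv.1 = some kv.2 then diff.erase kv.1 else diff) d).items
      = d.items.filter (pvNoMatch b) := by
  induction b generalizing d with
  | nil =>
    simp only [List.foldl_nil]
    rw [List.filter_eq_self.2]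
    intro x _
    have : (PySem.Dict.mk ([] : List (String × Int))).get? x.1 = none :=
      PySem.Dict.get?_empty x.1
    simp [pvNoMatch_eq, this]
  | cons kw rest ih =>
    obtain ⟨k, w⟩ := kw
    rw [List.map_cons] at hb
    have hk : k ∉ rest.map Prod.fst := (List.nodup_cons.1 hb).1
    have hbr : (rest.map Prod.fst).Nodup := (List.nodup_cons.1 hb).2
    have hrest_none : (PySem.Dict.mk rest).get? k = none := by
      rw [PySem.Dict.get?_eq_none_iff_not_mem_keys]
      simpa [PySem.Dict.keys_mk] using hk
    simp only [List.foldl_cons]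
    by_cases hs : d.get? k = some w
    · rw [if_pos hs, ih _ hbr (by
        have : (d.erase k).keys.Sublist d.keys := by
          simpa [PySem.Dict.erase, PySem.Dict.keys_mk, PySem.Dict.keys] using
            (List.filter_sublist (l := d.items) (p := fun p => !p.1 == k)).map Prod.fst
        exact this.nodup hd)]
      show (d.items.filter (fun p => !p.1 == k)).filter (pvNoMatch rest) = _
      rw [List.filter_filter]
      apply List.filter_congr
      intro x hx
      by_cases hxk : x.1 = k
      · have hv : x.2 = w := by
          have := PySem.Dict.get?_of_mem_items d (by simpa using hx) hd
          rw [hxk, hs] at this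
          exact (Option.some.inj this).symm
        simp [pvNoMatch_eq, PySem.Dict.get?_mk_cons, hxk, hv]
      · simp [pvNoMatch_eq, PySem.Dict.get?_mk_cons, Ne.symm hxk, hxk]
    · rw [if_neg hs, ih _ hbr hd]
      apply List.filter_congr
      intro x hx
      by_cases hxk : x.1 = k
      · have hv : d.get? k = some x.2 := by
          have := PySem.Dict.get?_of_mem_items d (by simpa using hx) hd
          rwa [hxk] at this
        have hne : x.2 ≠ w := fun h => hs (by rw [← h]; exact hv)
        simp [pvNoMatch_eq, PySem.Dict.get?_mk_cons, hxk, hrest_none, Ne.symm hne]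
      · simp [pvNoMatch_eq, PySem.Dict.get?_mk_cons, Ne.symm hxk]

theorem ofList_items (a : List (String × Int)) (ha : (a.map Prod.fst).Nodup) :
    (PySem.Dict.ofList a).items = a := by
  show (a.foldl (fun acc p => acc.insert p.1 p.2) PySem.Dict.empty).items = a
  rw [PySem.Dict.items_foldl_insert_fresh a Prod.fst Prod.snd _
    (fun p _ => PySem.Dict.contains_empty p.1) ha]
  simp [PySem.Dict.empty]

-- ===== VERDICT (by name: the statement is the Claim_ definition above) =====
theorem invariant_difference_spec : Claim_equal_invariant_difference := by
  intro a b _ hpre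
  obtain ⟨ha, hb⟩ := hpre
  show invariant_difference a b = invariant_difference_alt a b
  rw [a_side a b ha]
  unfold invariant_difference_alt
  rw [b_side b _ hb (by rw [PySem.Dict.keys]; rw [ofList_items a ha]; exact ha),
    ofList_items a ha]
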